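-- pv_equiv track=rewrite | github.com/yu6853/SleepLLM | Sleep2.0/utils/preprocess.py | _get_movement_count
-- ===== SOURCE A (Python) =====
-- min_movement_interval = 5  # 5秒
--
-- def _get_movement_count(data):
--     movement = [row[0] == 2 for row in data]  # 获取状态为体动的布尔列表
--     valid_movement_counts = 0  # 有效体动次数
--     last_movement_time = -min_movement_interval  # 用于存储上一次有效体动的时间，初始化为一个负值
--
--     for i in range(len(movement)):
--         if movement[i]:  # 当前状态为体动
--             # 仅在当前体动的时间与上一次有效体动的时间间隔大于等于5秒时，才计为新的体动
--             if i - last_movement_time >= min_movement_interval: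
--                 valid_movement_counts += 1  # 计入一次有效体动
--             last_movement_time = i  # 更新上一次有效体动的时间为当前的i
--         # 这里不需要 else，因为如果不是体动，继续遍历即可
--     return valid_movement_counts
-- ===== SOURCE B (Python) =====
-- min_movement_interval = 5  # 5秒
--
-- def _get_movement_count(data):
--     # Window formulation: a movement row is a counted event iff no other
--     # movement occurred in the previous (min_movement_interval - 1) seconds.
--     # Stateless local criterion; equivalent to A's stateful debounce because
--     # A's `last` is always the most recent movement index.
--     movement = [row[0] == 2 for row in data]
--     return sum(1 for i, m in enumerate(movement)
--                if m and not any(movement[max(0, i - min_movement_interval + 1):i]))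
-- ===== Notes on version B (the rewrite author's own statement) =====
-- stated objective: alternative
-- what changed: Replaces A's stateful debounce (a running last-movement register compared against on every movement) with a stateless sliding-window criterion: a movement row is counted iff no movement occurred in the previous 4 rows, computed per row from a local window slice.
import Mathlib
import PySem

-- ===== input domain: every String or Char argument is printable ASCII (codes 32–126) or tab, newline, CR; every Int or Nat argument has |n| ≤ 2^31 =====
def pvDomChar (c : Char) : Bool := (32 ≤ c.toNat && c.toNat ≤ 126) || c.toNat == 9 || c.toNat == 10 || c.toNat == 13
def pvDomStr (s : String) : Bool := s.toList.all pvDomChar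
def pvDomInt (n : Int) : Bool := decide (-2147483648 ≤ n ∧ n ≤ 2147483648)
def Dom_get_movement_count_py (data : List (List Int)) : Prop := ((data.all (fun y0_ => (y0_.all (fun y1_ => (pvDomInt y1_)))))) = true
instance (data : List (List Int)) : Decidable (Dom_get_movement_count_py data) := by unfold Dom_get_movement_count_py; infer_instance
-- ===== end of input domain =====

-- B replaces A's stateful debounce (running last-movement register) with a stateless
-- sliding-window criterion: a movement counts iff no movement in the previous 4 rows (objective: alternative).

-- ===== PORT A =====
-- Port of A: one indexed pass over the movement booleans, counting when the gap
-- from the last movement is ≥ 5 and updating last on every movement.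
def aLoop (ms : List Bool) (i : Int) (c : Int) (last : Int) : Int :=
  match ms with
  | [] => c
  | m :: rest =>
    if m then aLoop rest (i + 1) (if i - last ≥ 5 then c + 1 else c) i
    else aLoop rest (i + 1) c last

-- row[0] via pyGet?; Pre_ guarantees every row is nonempty (Python raises IndexError otherwise)
def get_movement_count_py (data : List (List Int)) : Int :=
  let movement := data.map (fun row => ((PySem.List.pyGet? row 0).getD 0) == 2)
  aLoop movement 0 0 (-5)

-- ===== PORT B =====
-- Port of B: sum 1 for each (i, m) in enumerate(movement) with m true and no
-- movement inside the window movement[max(0, i - 5 + 1):i].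
def get_movement_count_py_alt (data : List (List Int)) : Int :=
  let movement := data.map (fun row => ((PySem.List.pyGet? row 0).getD 0) == 2)
  (((PySem.List.enumerate movement 0).filter
      (fun p => p.2 &&
        !((PySem.List.slice movement (some (max 0 (p.1 - 5 + 1))) (some p.1)).any id))).map
    (fun _ => (1 : Int))).sum

-- ===== PRECONDITION & SPEC =====
-- Pre_ excludes inputs containing an empty row, on which the Python A raises IndexError at row[0].
def Pre_get_movement_count_py (data : List (List Int)) : Prop :=
  ∀ row ∈ data, row ≠ []
instance (data : List (List Int)) : Decidable (Pre_get_movement_count_py data) := by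
  unfold Pre_get_movement_count_py; infer_instance
def pvWitness_get_movement_count_py : List (List Int) := [[2], [0], [2, 1], [1]]
def Spec_get_movement_count_py (data : List (List Int)) (out : Int) : Prop := out = get_movement_count_py_alt data
instance (data : List (List Int)) (out : Int) : Decidable (Spec_get_movement_count_py data out) := by unfold Spec_get_movement_count_py; infer_instance

-- ===== CLAIM (what is proved, stated in full; the proofs are below) =====
def Claim_equal_get_movement_count_py : Prop := ∀ (data : List (List Int)), Dom_get_movement_count_py data → Pre_get_movement_count_py data → Spec_get_movement_count_py data (get_movement_count_py data)

-- ===== LEMMAS AND PROOFS =====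

-- recursive form of B's windowed count over the suffix s of mv starting at index i
def cntB (mv : List Bool) : List Bool → Nat → Int
  | [], _ => 0
  | m :: rest, i =>
    (if m && !((PySem.List.slice mv (some (max 0 ((i : Int) - 5 + 1))) (some (i : Int))).any id)
      then (1 : Int) else 0) + cntB mv rest (i + 1)

-- B's filter/map/sum over enumerate equals cntB
theorem sum_enum_eq_cntB (mv : List Bool) (s : List Bool) (i : Nat) :
    (((PySem.List.enumerate s (i : Int)).filter
        (fun p => p.2 &&
          !((PySem.List.slice mv (some (max 0 (p.1 - 5 + 1))) (some p.1)).any id))).map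
      (fun _ => (1 : Int))).sum = cntB mv s i := by
  induction s generalizing i with
  | nil => rfl
  | cons m rest ih =>
    rw [PySem.List.enumerate_cons, List.filter_cons]
    have hcast : ((i : Int) + 1) = ((i + 1 : Nat) : Int) := by push_cast; ring
    rw [hcast, cntB]
    by_cases hm : (m && !((PySem.List.slice mv (some (max 0 ((i : Int) - 5 + 1))) (some (i : Int))).any id)) = true
    · rw [if_pos hm, if_pos hm, List.map_cons, List.sum_cons, ih]
    · rw [if_neg hm, if_neg hm, ih, zero_add]

-- invariant: `last` is -5 and no movement yet, or the index of the latest movement in the prefix p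
def InvLast (p : List Bool) (last : Int) : Prop :=
  (last = -5 ∧ ∀ b ∈ p, b = false) ∨
  (∃ k : Nat, last = (k : Int) ∧ p[k]? = some true ∧ ∀ j : Nat, k < j → p[j]? ≠ some true)

theorem invLast_nil : InvLast [] (-5) := Or.inl ⟨rfl, by simp⟩

theorem invLast_false (p : List Bool) (last : Int) (h : InvLast p last) :
    InvLast (p ++ [false]) last := by
  rcases h with ⟨h5, hall⟩ | ⟨k, hk, hget, haft⟩
  · refine Or.inl ⟨h5, ?_⟩
    intro b hb
    rcases List.mem_append.1 hb with h | h
    · exact hall b h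
    · simpa using h
  · refine Or.inr ⟨k, hk, ?_, ?_⟩
    · rw [List.getElem?_append_left (List.getElem?_eq_some_iff.1 hget).1]
      exact hget
    · intro j hj hget'
      by_cases hjlt : j < p.length
      · exact haft j hj (by rwa [List.getElem?_append_left hjlt] at hget')
      · rw [List.getElem?_append_right (by omega)] at hget'
        cases h0 : j - p.length with
        | zero => rw [h0] at hget'; simp at hget'
        | succ n => rw [h0] at hget'; simp at hget'

theorem invLast_true (p : List Bool) :
    InvLast (p ++ [true]) ((p.length : Int)) := by
  refine Or.inr ⟨p.length, rfl, ?_, ?_⟩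
  · simp
  · intro j hj hget
    have hjl := (List.getElem?_eq_some_iff.1 hget).1
    simp at hjl
    omega

-- the window of B at index p.length, rewritten to a drop of the prefix
theorem slice_window (p s : List Bool) :
    PySem.List.slice (p ++ s) (some (max 0 ((p.length : Int) - 5 + 1))) (some (p.length : Int))
      = p.drop (p.length - 4) := by
  have h : max 0 ((p.length : Int) - 5 + 1) = ((p.length - 4 : Nat) : Int) := by
    omega
  rw [h, PySem.List.slice_natCast, List.drop_append_of_le_length (by omega)]
  rw [List.take_append_of_le_length (by simp)]
  have hlen : p.length - (p.length - 4) = (p.drop (p.length - 4)).length := by simp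
  rw [hlen, List.take_length]

-- under the invariant, "window has no movement" is exactly A's debounce test
theorem window_iff (p : List Bool) (last : Int) (h : InvLast p last) :
    ((p.drop (p.length - 4)).any id = false) ↔ 5 ≤ (p.length : Int) - last := by
  rcases h with ⟨h5, hall⟩ | ⟨k, hk, hget, haft⟩
  · subst h5
    constructor
    · intro _
      have : (0 : Int) ≤ (p.length : Int) := by positivity
      omega
    · intro _
      rw [List.any_eq_false]
      intro b hb
      simp [hall b (List.mem_of_mem_drop hb)]
  · subst hk
    have hklt : k < p.length := (List.getElem?_eq_some_iff.1 hget).1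
    have hany : (p.drop (p.length - 4)).any id = true ↔ p.length - 4 ≤ k := by
      constructor
      · intro ha
        rcases List.any_eq_true.1 ha with ⟨b, hb, hbid⟩
        rcases List.getElem_of_mem hb with ⟨j, hjl, hjv⟩
        have hidx : p[(p.length - 4) + j]? = some true := by
          rw [← List.getElem?_drop, List.getElem?_eq_getElem hjl, hjv]
          simpa using hbid
        by_contra hle
        exact haft _ (by omega) hidx
      · intro hle
        apply List.any_eq_true.2
        refine ⟨true, ?_, rfl⟩
        have hidx : (p.drop (p.length - 4))[k - (p.length - 4)]? = some true := by
          rw [List.getElem?_drop]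
          rwa [show p.length - 4 + (k - (p.length - 4)) = k by omega]
        exact List.mem_of_getElem? hidx
    constructor
    · intro hfalse
      have hnot : ¬ (p.length - 4 ≤ k) := by
        intro hc
        rw [hany.2 hc] at hfalse
        exact Bool.noConfusion hfalse
      omega
    · intro h5
      cases hb : (p.drop (p.length - 4)).any id with
      | false => rfl
      | true =>
        have := hany.1 hb
        omega

-- main invariant lemma: A's loop over the suffix equals c plus B's windowed count
theorem aLoop_eq_cntB (s : List Bool) :
    ∀ (p : List Bool) (c last : Int), InvLast p last →
      aLoop s ((p.length : Int)) c last = c + cntB (p ++ s) s p.length := by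
  induction s with
  | nil =>
    intro p c last _
    simp [aLoop, cntB]
  | cons m rest ih =>
    intro p c last hinv
    have hiff := window_iff p last hinv
    have hlen : ((p.length : Int)) + 1 = (((p ++ [m]).length : Nat) : Int) := by
      rw [List.length_append, List.length_cons, List.length_nil]
      push_cast
      ring
    have hassoc : p ++ m :: rest = (p ++ [m]) ++ rest := by simp
    cases m with
    | true =>
      have hrec := ih (p ++ [true]) (if (p.length : Int) - last ≥ 5 then c + 1 else c)
        ((p.length : Int)) (invLast_true p)
      simp only [aLoop, if_true]
      rw [cntB, slice_window p (true :: rest), hassoc, hlen, hrec]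
      have hlen2 : (p ++ [true]).length = p.length + 1 := by simp
      rw [hlen2]
      by_cases h5 : 5 ≤ (p.length : Int) - last
      · rw [if_pos h5, hiff.2 h5]
        simp
        ring
      · rw [if_neg h5]
        have hwt : (p.drop (p.length - 4)).any id = true := by
          cases hb : (p.drop (p.length - 4)).any id with
          | false => exact absurd (hiff.1 hb) h5
          | true => rfl
        rw [hwt]
        simp
    | false =>
      have hrec := ih (p ++ [false]) c last (invLast_false p last hinv)
      simp only [aLoop, Bool.false_eq_true, if_false]
      rw [cntB, slice_window p (false :: rest), hassoc, hlen, hrec]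
      have hlen2 : (p ++ [false]).length = p.length + 1 := by simp
      rw [hlen2]
      simp

-- ===== VERDICT (by name: the statement is the Claim_ definition above) =====
theorem get_movement_count_py_spec : Claim_equal_get_movement_count_py := by
  intro data _ _
  unfold Spec_get_movement_count_py
  change aLoop (data.map (fun row => ((PySem.List.pyGet? row 0).getD 0) == 2)) 0 0 (-5) =
    (((PySem.List.enumerate (data.map (fun row => ((PySem.List.pyGet? row 0).getD 0) == 2)) 0).filter
        (fun p => p.2 &&
          !((PySem.List.slice (data.map (fun row => ((PySem.List.pyGet? row 0).getD 0) == 2))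
              (some (max 0 (p.1 - 5 + 1))) (some p.1)).any id))).map
      (fun _ => (1 : Int))).sum
  set mv := data.map (fun row => ((PySem.List.pyGet? row 0).getD 0) == 2) with hmv
  have hA : aLoop mv 0 0 (-5) = cntB mv mv 0 := by
    simpa using aLoop_eq_cntB mv [] 0 (-5) invLast_nil
  exact hA.trans (sum_enum_eq_cntB mv mv 0).symm
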